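-- pv_equiv track=rewrite | github.com/nargesam/CS-ML-Basics | leetcodes/Twitter_Focused/Palindrome_sub_cnt.py | palindromeSubCnt
-- ===== SOURCE A (Python) =====
-- def palindromeSubCnt(s):
--
--     cnt = 0
--     N = len(s)
--     p = []
--
--     for center in range(2*N - 1):
--         left = center//2
--         right = left + center%2
--         while left >= 0 and  right < N and s[left] == s[right]:
--             if left == right:
--                 p.append(s[left])
--             else:
--                 p.append(s[left:right+1])
--             left -=1
--             right += 1
--
--
--     return len(set(p))
-- ===== SOURCE B (Python) =====
-- def palindromeSubCnt(s):
--     found = set()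
--     n = len(s)
--     for i in range(n):
--         for j in range(i + 1, n + 1):
--             t = s[i:j]
--             if t == t[::-1]:
--                 found.add(t)
--     return len(found)
-- ===== Notes on version B (the rewrite author's own statement) =====
-- stated objective: simpler
-- what changed: Replaces center-expansion with inner while-loops collecting palindromic slices into a list by a plain double loop over all substrings with a reversal test, adding each palindrome directly to a set.
import Mathlib
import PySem

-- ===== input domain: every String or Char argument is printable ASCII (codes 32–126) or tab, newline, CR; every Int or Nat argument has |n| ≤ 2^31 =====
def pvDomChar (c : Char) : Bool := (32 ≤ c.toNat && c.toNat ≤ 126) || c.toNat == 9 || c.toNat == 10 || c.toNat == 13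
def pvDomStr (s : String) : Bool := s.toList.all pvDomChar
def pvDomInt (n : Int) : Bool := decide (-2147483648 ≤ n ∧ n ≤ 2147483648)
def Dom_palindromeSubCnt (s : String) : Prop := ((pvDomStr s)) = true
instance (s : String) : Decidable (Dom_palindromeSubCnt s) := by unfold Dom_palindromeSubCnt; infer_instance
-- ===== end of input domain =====

-- B replaces A's center-expansion/while-loop collection by a plain double loop over all
-- substrings with a reversal test into a set (objective: simpler; same worst-case cost).
-- Strings are handled on the char-list side (PySem.Chars convention); only the Int count is returned.

-- ===== PORT A =====
-- the value A appends for the palindrome spanning [left, right]: s[left] (one char) or s[left:right+1]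
def palEntry (cs : List Char) (left right : Int) : List Char :=
  if left = right then (PySem.List.pyGet? cs left).toList
  else PySem.List.slice cs (some left) (some (right + 1))

-- A's inner while loop: expand around (left, right), appending each palindrome found
def palAWhile (cs : List Char) (N left right : Int) (p : List (List Char)) : List (List Char) :=
  if h : 0 ≤ left ∧ right < N ∧ PySem.List.pyGet? cs left = PySem.List.pyGet? cs right then
    palAWhile cs N (left - 1) (right + 1) (p ++ [palEntry cs left right])
  else p
termination_by (left + 1).toNat
decreasing_by obtain ⟨h1, -, -⟩ := h; omega

def palindromeSubCnt (s : String) : Int :=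
  let N : Int := (PySem.Str.len s : Int)
  let p : List (List Char) :=
    (PySem.List.pyRange 0 (2 * N - 1) 1).foldl
      (fun p center =>
        palAWhile s.toList N (PySem.Int.floordiv center 2)
          (PySem.Int.floordiv center 2 + PySem.Int.mod center 2) p) []
  ((PySem.Set.ofList p).length : Int)

-- ===== PORT B =====
def palindromeSubCnt_alt (s : String) : Int :=
  let n : Int := (PySem.Str.len s : Int)
  let cs := s.toList
  let found : PySem.Set (List Char) :=
    (PySem.List.pyRange 0 n 1).foldl (fun acc i =>
      (PySem.List.pyRange (i + 1) (n + 1) 1).foldl (fun acc j =>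
        let t := PySem.List.slice cs (some i) (some j)
        if t = (PySem.List.slice? t none none (-1)).getD [] then PySem.Set.add acc t else acc)
        acc)
      PySem.Set.empty
  (PySem.Set.len found : Int)

-- ===== PRECONDITION & SPEC =====
def Spec_palindromeSubCnt (s : String) (out : Int) : Prop := out = palindromeSubCnt_alt s
instance (s : String) (out : Int) : Decidable (Spec_palindromeSubCnt s out) := by unfold Spec_palindromeSubCnt; infer_instance

-- ===== CLAIM (what is proved, stated in full; the proofs are below) =====
def Claim_equal_palindromeSubCnt : Prop := ∀ (s : String), Dom_palindromeSubCnt s → Spec_palindromeSubCnt s (palindromeSubCnt s)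

-- ===== LEMMAS AND PROOFS =====

-- the contiguous segment cs[i:j] as drop/take
def seg (cs : List Char) (i j : Nat) : List Char := (cs.drop i).take (j - i)

-- t is a (nonempty) palindromic substring of cs
def IsPalSub (cs : List Char) (t : List Char) : Prop :=
  ∃ i j : Nat, i < j ∧ j ≤ cs.length ∧ t = seg cs i j ∧ (seg cs i j).reverse = seg cs i j

-- generic: membership through a foldl whose step satisfies a membership iff
theorem mem_foldl_iff {α β : Type} (f : List α → β → List α) (Q : β → α → Prop)
    (hf : ∀ p c y, y ∈ f p c ↔ y ∈ p ∨ Q c y) :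
    ∀ (l : List β) (p : List α) (y : α), y ∈ l.foldl f p ↔ y ∈ p ∨ ∃ c ∈ l, Q c y := by
  intro l
  induction l with
  | nil => simp
  | cons c l ih =>
    intro p y
    rw [List.foldl_cons, ih, hf]
    constructor
    · rintro ((h | h) | ⟨c', hc', h⟩)
      · exact Or.inl h
      · exact Or.inr ⟨c, by simp, h⟩
      · exact Or.inr ⟨c', by simp [hc'], h⟩
    · rintro (h | ⟨c', hc', h⟩)
      · exact Or.inl (Or.inl h)
      · rcases List.mem_cons.mp hc' with rfl | hc'
        · exact Or.inl (Or.inr h)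
        · exact Or.inr ⟨c', hc', h⟩

-- generic: a foldl whose step preserves Nodup
theorem nodup_foldl {α β : Type} (f : List α → β → List α)
    (hf : ∀ p c, p.Nodup → (f p c).Nodup) :
    ∀ (l : List β) (p : List α), p.Nodup → (l.foldl f p).Nodup := by
  intro l
  induction l with
  | nil => exact fun p h => h
  | cons c l ih => intro p hp; exact ih _ (hf p c hp)

-- membership in A's while loop: the entries of all fully-guarded expansion layers
theorem mem_palAWhile (cs : List Char) (N : Int) :
    ∀ (l r : Int) (p : List (List Char)) (t : List Char),
    t ∈ palAWhile cs N l r p ↔ t ∈ p ∨ ∃ k : Nat,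
      (∀ m : Nat, m ≤ k → (0 ≤ l - m ∧ r + m < N ∧
        PySem.List.pyGet? cs (l - m) = PySem.List.pyGet? cs (r + m)))
      ∧ t = palEntry cs (l - k) (r + k) := by
  intro l r p t
  induction l, r, p using palAWhile.induct cs N with
  | case1 l r p h ih =>
    rw [palAWhile, dif_pos h, ih]
    constructor
    · rintro (hmem | ⟨k, hg, ht⟩)
      · rcases List.mem_append.mp hmem with hp | he
        · exact Or.inl hp
        · right
          refine ⟨0, ?_, ?_⟩
          · intro m hm
            have hm0 : m = 0 := by omega
            subst hm0
            simpa using h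
          · simpa using List.mem_singleton.mp he
      · right
        refine ⟨k + 1, ?_, ?_⟩
        · intro m hm
          match m with
          | 0 => simpa using h
          | Nat.succ m =>
            have := hg m (by omega)
            have e1 : l - ((m + 1 : Nat) : Int) = l - 1 - (m : Nat) := by push_cast; ring
            have e2 : r + ((m + 1 : Nat) : Int) = r + 1 + (m : Nat) := by push_cast; ring
            rw [e1, e2]
            exact this
        · have e1 : l - ((k + 1 : Nat) : Int) = l - 1 - (k : Nat) := by push_cast; ring
          have e2 : r + ((k + 1 : Nat) : Int) = r + 1 + (k : Nat) := by push_cast; ring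
          rw [e1, e2]
          exact ht
    · rintro (hp | ⟨k, hg, ht⟩)
      · exact Or.inl (List.mem_append.mpr (Or.inl hp))
      · match k with
        | 0 =>
          left
          refine List.mem_append.mpr (Or.inr ?_)
          simpa using ht
        | Nat.succ k =>
          right
          refine ⟨k, ?_, ?_⟩
          · intro m hm
            have := hg (m + 1) (by omega)
            have e1 : l - ((m + 1 : Nat) : Int) = l - 1 - (m : Nat) := by push_cast; ring
            have e2 : r + ((m + 1 : Nat) : Int) = r + 1 + (m : Nat) := by push_cast; ring
            rw [e1, e2] at this
            exact this
          · have e1 : l - ((k + 1 : Nat) : Int) = l - 1 - (k : Nat) := by push_cast; ring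
            have e2 : r + ((k + 1 : Nat) : Int) = r + 1 + (k : Nat) := by push_cast; ring
            rw [e1, e2] at ht
            exact ht
  | case2 l r p h =>
    rw [palAWhile, dif_neg h]
    constructor
    · exact Or.inl
    · rintro (hp | ⟨k, hg, ht⟩)
      · exact hp
      · exact absurd (by simpa using hg 0 (by omega)) h

-- palindrome with matching ends
theorem pal_ends (x y : Char) (m : List Char) :
    (x :: (m ++ [y])).reverse = x :: (m ++ [y]) ↔ y = x ∧ m.reverse = m := by
  constructor
  · intro h
    rw [List.reverse_cons, List.reverse_append, List.reverse_singleton] at h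
    simp only [List.singleton_append] at h
    injection h with h1 h2
    subst h1
    exact ⟨rfl, List.append_inj_left' h2 (by simp)⟩
  · rintro ⟨rfl, hm⟩
    rw [List.reverse_cons, List.reverse_append, List.reverse_singleton, hm]
    simp

theorem seg_cons (cs : List Char) (a b : Nat) (h : a < b) (hb : b ≤ cs.length) :
    seg cs a b = cs[a]'(by omega) :: seg cs (a + 1) b := by
  have h1 : b - a = (b - (a + 1)) + 1 := by omega
  rw [seg, List.drop_eq_getElem_cons (by omega), h1, List.take_succ_cons, seg]

theorem seg_concat (cs : List Char) (a b : Nat) (h : a ≤ b) (hb : b < cs.length) :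
    seg cs a (b + 1) = seg cs a b ++ [cs[b]] := by
  have h1 : b + 1 - a = (b - a) + 1 := by omega
  rw [seg, h1, List.take_add_one, List.getElem?_drop]
  have h2 : a + (b - a) = b := by omega
  rw [h2, List.getElem?_eq_getElem hb]
  rw [seg]
  simp

theorem pal_getElem (l : List Char) (h : l.reverse = l) (u : Nat) (hu : u < l.length) :
    l[u] = l[l.length - 1 - u]'(by omega) := by
  have h1 : l[u]? = l.reverse[u]? := by rw [h]
  rw [List.getElem?_reverse hu] at h1
  rw [List.getElem?_eq_getElem hu, List.getElem?_eq_getElem (by omega)] at h1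
  injection h1

-- compare two in-range pyGet? lookups as a getElem equality
theorem pyGet?_eq_iff (cs : List Char) (x y : Nat) (hx : x < cs.length) (hy : y < cs.length) :
    PySem.List.pyGet? cs (x : Int) = PySem.List.pyGet? cs (y : Int) ↔ cs[x] = cs[y] := by
  rw [PySem.List.pyGet?_natCast, PySem.List.pyGet?_natCast,
    List.getElem?_eq_getElem hx, List.getElem?_eq_getElem hy]
  simp

-- forward: under the guards, every layer's entry is a palindromic substring
theorem layers_pal (cs : List Char) (l r : Int) (hl : 0 ≤ l) (hlr : r = l ∨ r = l + 1) :
    ∀ k : Nat,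
      (∀ m : Nat, m ≤ k → (0 ≤ l - m ∧ r + m < (cs.length : Int) ∧
        PySem.List.pyGet? cs (l - m) = PySem.List.pyGet? cs (r + m))) →
      (seg cs (l - k).toNat ((r + k).toNat + 1)).reverse = seg cs (l - k).toNat ((r + k).toNat + 1) := by
  intro k
  induction k with
  | zero =>
    intro hg
    obtain ⟨-, hrlen, hchar⟩ := hg 0 (le_refl 0)
    simp only [Nat.cast_zero, sub_zero, add_zero] at hrlen hchar ⊢
    obtain ⟨na, rfl⟩ : ∃ na : Nat, l = (na : Int) := ⟨l.toNat, (Int.toNat_of_nonneg hl).symm⟩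
    rcases hlr with rfl | rfl
    · simp only [Int.toNat_natCast]
      rw [seg_cons cs na (na + 1) (by omega) (by omega)]
      rw [show seg cs (na + 1) (na + 1) = [] from by simp [seg]]
      simp
    · have e1 : ((na : Int) + 1).toNat = na + 1 := by omega
      simp only [Int.toNat_natCast, e1]
      have hlen2 : na + 1 < cs.length := by omega
      rw [show (na : Int) + 1 = ((na + 1 : Nat) : Int) from by push_cast; ring] at hchar
      rw [pyGet?_eq_iff cs na (na + 1) (by omega) hlen2] at hchar
      rw [seg_cons cs na (na + 1 + 1) (by omega) (by omega)]
      rw [seg_cons cs (na + 1) (na + 1 + 1) (by omega) (by omega)]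
      rw [show seg cs (na + 1 + 1) (na + 1 + 1) = [] from by simp [seg]]
      simp [hchar]
  | succ k ih =>
    intro hg
    have ihp := ih (fun m hm => hg m (le_trans hm (Nat.le_succ k)))
    obtain ⟨hlk1, hrk1, hchar⟩ := hg (k + 1) (le_refl _)
    obtain ⟨hlk, hrk, -⟩ := hg k (Nat.le_succ k)
    have hr0 : 0 ≤ r := by rcases hlr with rfl | rfl <;> omega
    set a := (l - (k : Nat)).toNat with ha
    set b := (r + (k : Nat)).toNat with hb
    have haa : (a : Int) = l - (k : Nat) := Int.toNat_of_nonneg hlk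
    have hbb : (b : Int) = r + (k : Nat) := Int.toNat_of_nonneg (by omega)
    have hk1 : ((k + 1 : Nat) : Int) = (k : Nat) + 1 := by push_cast; ring
    have ha1 : 1 ≤ a := by rw [hk1] at hlk1; omega
    have hblen : b + 1 < cs.length := by rw [hk1] at hrk1; omega
    have hab2 : a ≤ b + 1 := by rcases hlr with rfl | rfl <;> omega
    have e1 : (l - ((k + 1 : Nat) : Int)).toNat = a - 1 := by rw [hk1]; omega
    have e2 : (r + ((k + 1 : Nat) : Int)).toNat = b + 1 := by rw [hk1]; omega
    rw [e1, e2]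
    rw [show l - ((k + 1 : Nat) : Int) = ((a - 1 : Nat) : Int) from by rw [hk1]; push_cast [ha1]; omega] at hchar
    rw [show r + ((k + 1 : Nat) : Int) = ((b + 1 : Nat) : Int) from by rw [hk1]; push_cast; omega] at hchar
    rw [pyGet?_eq_iff cs (a - 1) (b + 1) (by omega) hblen] at hchar
    rw [seg_cons cs (a - 1) (b + 1 + 1) (by omega) (by omega)]
    rw [show a - 1 + 1 = a from by omega]
    rw [seg_concat cs a (b + 1) hab2 hblen]
    rw [pal_ends]
    exact ⟨hchar.symm, ihp⟩

-- the entry at a guarded layer IS the segment it spans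
theorem entry_eq_seg (cs : List Char) (a b : Int) (ha : 0 ≤ a) (hab : a ≤ b) (hb : b < (cs.length : Int)) :
    palEntry cs a b = seg cs a.toNat (b.toNat + 1) := by
  obtain ⟨na, rfl⟩ : ∃ na : Nat, a = (na : Int) := ⟨a.toNat, (Int.toNat_of_nonneg ha).symm⟩
  obtain ⟨nb, rfl⟩ : ∃ nb : Nat, b = (nb : Int) := ⟨b.toNat, (Int.toNat_of_nonneg (le_trans ha hab)).symm⟩
  rw [palEntry]
  simp only [Int.toNat_natCast]
  have hlen : na < cs.length := by omega
  by_cases hab2 : na = nb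
  · subst hab2
    rw [if_pos rfl, PySem.List.pyGet?_natCast, List.getElem?_eq_getElem hlen]
    rw [seg_cons cs na (na + 1) (by omega) (by omega)]
    simp [seg]
  · rw [if_neg (by exact_mod_cast hab2)]
    rw [PySem.List.slice_toNat cs (Int.natCast_nonneg na) (by omega)]
    have h2 : ((nb : Int) + 1).toNat = nb + 1 := by omega
    rw [h2, seg]
    simp

theorem seg_length (cs : List Char) (i j : Nat) (hj : j ≤ cs.length) :
    (seg cs i j).length = j - i := by
  simp [seg]
  omega

theorem seg_getElem (cs : List Char) (i j u : Nat)
    (h1 : u < (seg cs i j).length) (h2 : i + u < cs.length) :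
    (seg cs i j)[u]'h1 = cs[i + u]'h2 := by
  simp [seg, List.getElem_take, List.getElem_drop]

-- A's collected list contains exactly the palindromic substrings
theorem memA_iff (s : String) (t : List Char) :
    (t ∈ (PySem.List.pyRange 0 (2 * (PySem.Str.len s : Int) - 1) 1).foldl
      (fun p center =>
        palAWhile s.toList (PySem.Str.len s : Int) (PySem.Int.floordiv center 2)
          (PySem.Int.floordiv center 2 + PySem.Int.mod center 2) p) [])
    ↔ IsPalSub s.toList t := by
  have hn : (PySem.Str.len s : Int) = ((s.toList.length : Nat) : Int) := by simp [PySem.Str.len_eq]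
  rw [mem_foldl_iff _
    (fun c y => ∃ k : Nat,
      (∀ m : Nat, m ≤ k → (0 ≤ PySem.Int.floordiv c 2 - m ∧
        PySem.Int.floordiv c 2 + PySem.Int.mod c 2 + m < (PySem.Str.len s : Int) ∧
        PySem.List.pyGet? s.toList (PySem.Int.floordiv c 2 - m) =
          PySem.List.pyGet? s.toList (PySem.Int.floordiv c 2 + PySem.Int.mod c 2 + m)))
      ∧ y = palEntry s.toList (PySem.Int.floordiv c 2 - k) (PySem.Int.floordiv c 2 + PySem.Int.mod c 2 + k))
    (fun p c y => mem_palAWhile s.toList (PySem.Str.len s : Int) (PySem.Int.floordiv c 2)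
      (PySem.Int.floordiv c 2 + PySem.Int.mod c 2) p y) _ _ t]
  simp only [List.not_mem_nil, false_or]
  constructor
  · rintro ⟨c, hc, k, hg, rfl⟩
    rw [PySem.List.mem_pyRange_one] at hc
    obtain ⟨cn, rfl⟩ : ∃ cn : Nat, c = (cn : Int) := ⟨c.toNat, (Int.toNat_of_nonneg hc.1).symm⟩
    have hfd : PySem.Int.floordiv (cn : Int) 2 = ((cn / 2 : Nat) : Int) := by
      exact_mod_cast PySem.Int.floordiv_natCast cn 2
    have hmd : PySem.Int.mod (cn : Int) 2 = ((cn % 2 : Nat) : Int) := by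
      exact_mod_cast PySem.Int.mod_natCast cn 2
    set l0n : Nat := cn / 2 with hl0
    set r0n : Nat := cn / 2 + cn % 2 with hr0
    have hcast : ((cn / 2 : Nat) : Int) + ((cn % 2 : Nat) : Int) = ((r0n : Nat) : Int) := by
      push_cast; omega
    rw [hfd, hmd, hcast] at hg ⊢
    rw [hn] at hg
    obtain ⟨hk1, hk2, -⟩ := hg k (le_refl k)
    have hlr : ((r0n : Nat) : Int) = ((l0n : Nat) : Int) ∨ ((r0n : Nat) : Int) = ((l0n : Nat) : Int) + 1 := by
      rcases Nat.mod_two_eq_zero_or_one cn with h | h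
      · left; omega
      · right; omega
    have hp := layers_pal s.toList ((l0n : Nat) : Int) ((r0n : Nat) : Int) (Int.natCast_nonneg l0n) hlr k hg
    have e1 : (((l0n : Nat) : Int) - (k : Nat)).toNat = l0n - k := by omega
    have e2 : (((r0n : Nat) : Int) + (k : Nat)).toNat = r0n + k := by omega
    rw [e1, e2] at hp
    have he := entry_eq_seg s.toList (((l0n : Nat) : Int) - (k : Nat)) (((r0n : Nat) : Int) + (k : Nat))
      (by omega) (by omega) (by omega)
    rw [e1, e2] at he
    exact ⟨l0n - k, r0n + k + 1, by omega, by omega, he, hp⟩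
  · rintro ⟨i, j, hij, hjlen, rfl, hpal⟩
    set cn : Nat := i + j - 1 with hcn
    set l0n : Nat := cn / 2 with hl0
    set r0n : Nat := cn / 2 + cn % 2 with hr0
    have hsum : l0n + r0n = cn := by omega
    have hil : i ≤ l0n := by omega
    have hrj : r0n ≤ j - 1 := by omega
    have hlr0 : l0n ≤ r0n := by omega
    set k : Nat := l0n - i with hk
    have hfd : PySem.Int.floordiv (cn : Int) 2 = ((cn / 2 : Nat) : Int) := by
      exact_mod_cast PySem.Int.floordiv_natCast cn 2
    have hmd : PySem.Int.mod (cn : Int) 2 = ((cn % 2 : Nat) : Int) := by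
      exact_mod_cast PySem.Int.mod_natCast cn 2
    have hcast : ((cn / 2 : Nat) : Int) + ((cn % 2 : Nat) : Int) = ((r0n : Nat) : Int) := by
      push_cast; omega
    refine ⟨(cn : Nat), ?_, k, ?_, ?_⟩
    · rw [PySem.List.mem_pyRange_one, hn]
      omega
    · intro m hm
      rw [hfd, hmd, hcast, hn]
      have ha : ((l0n : Nat) : Int) - (m : Nat) = (((l0n - m : Nat)) : Int) := by omega
      have hb : ((r0n : Nat) : Int) + (m : Nat) = (((r0n + m : Nat)) : Int) := by omega
      refine ⟨by omega, by omega, ?_⟩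
      rw [ha, hb, pyGet?_eq_iff s.toList (l0n - m) (r0n + m) (by omega) (by omega)]
      -- ends of the palindromic segment at equal distance from its center are equal
      have hL : (seg s.toList i j).length = j - i := seg_length s.toList i j hjlen
      have h1 := pal_getElem _ hpal (l0n - m - i) (by rw [hL]; omega)
      simp only [hL] at h1
      rw [seg_getElem s.toList i j (l0n - m - i) (by rw [hL]; omega) (by omega)] at h1
      rw [seg_getElem s.toList i j (j - i - 1 - (l0n - m - i)) (by rw [hL]; omega) (by omega)] at h1
      simp only [show i + (l0n - m - i) = l0n - m from by omega,
        show i + (j - i - 1 - (l0n - m - i)) = r0n + m from by omega] at h1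
      exact h1
    · rw [hfd, hmd, hcast]
      have ha : ((l0n : Nat) : Int) - (k : Nat) = ((i : Nat) : Int) := by omega
      have hb : ((r0n : Nat) : Int) + (k : Nat) = (((j - 1 : Nat)) : Int) := by omega
      rw [ha, hb, entry_eq_seg s.toList ((i : Nat) : Int) (((j - 1 : Nat)) : Int)
        (Int.natCast_nonneg i) (by omega) (by omega)]
      simp only [Int.toNat_natCast]
      rw [show j - 1 + 1 = j from by omega]

-- B's set contains exactly the palindromic substrings
theorem memB_iff (s : String) (t : List Char) :
    (t ∈ (PySem.List.pyRange 0 (PySem.Str.len s : Int) 1).foldl (fun acc i =>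
      (PySem.List.pyRange (i + 1) ((PySem.Str.len s : Int) + 1) 1).foldl (fun acc j =>
        let u := PySem.List.slice s.toList (some i) (some j)
        if u = (PySem.List.slice? u none none (-1)).getD [] then PySem.Set.add acc u else acc)
        acc)
      PySem.Set.empty)
    ↔ IsPalSub s.toList t := by
  have hinner : ∀ (i : Int) (acc : PySem.Set (List Char)) (y : List Char),
      (y ∈ (PySem.List.pyRange (i + 1) ((PySem.Str.len s : Int) + 1) 1).foldl (fun acc j =>
          let u := PySem.List.slice s.toList (some i) (some j)
          if u = (PySem.List.slice? u none none (-1)).getD [] then PySem.Set.add acc u else acc)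
        acc)
      ↔ y ∈ acc ∨ ∃ j ∈ PySem.List.pyRange (i + 1) ((PySem.Str.len s : Int) + 1) 1,
          (PySem.List.slice s.toList (some i) (some j)).reverse = PySem.List.slice s.toList (some i) (some j)
          ∧ y = PySem.List.slice s.toList (some i) (some j) := by
    intro i acc y
    refine mem_foldl_iff _
      (fun c z => (PySem.List.slice s.toList (some i) (some c)).reverse = PySem.List.slice s.toList (some i) (some c)
        ∧ z = PySem.List.slice s.toList (some i) (some c)) ?_ _ acc y
    intro p c z
    dsimp only
    rw [PySem.List.slice?_none_none_neg_one, Option.getD_some]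
    by_cases hc : (PySem.List.slice s.toList (some i) (some c)).reverse = PySem.List.slice s.toList (some i) (some c)
    · rw [if_pos hc.symm, PySem.Set.mem_add]
      constructor
      · rintro (hz | rfl)
        · exact Or.inl hz
        · exact Or.inr ⟨hc, rfl⟩
      · rintro (hz | ⟨-, rfl⟩)
        · exact Or.inl hz
        · exact Or.inr rfl
    · rw [if_neg (fun h => hc h.symm)]
      exact ⟨Or.inl, fun h => by rcases h with hz | ⟨hpal, -⟩; exact hz; exact absurd hpal hc⟩
  rw [mem_foldl_iff _ _ (fun p c y => hinner c p y) _ _ t]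
  have hn : (PySem.Str.len s : Int) = (s.toList.length : Int) := by
    simp [PySem.Str.len_eq]
  rw [hn]
  constructor
  · rintro (habs | ⟨i, hi, jj, hj, hpal, rfl⟩)
    · simp [PySem.Set.empty] at habs
    · rw [PySem.List.mem_pyRange_one] at hi hj
      obtain ⟨ni, rfl⟩ : ∃ ni : Nat, i = (ni : Int) := ⟨i.toNat, (Int.toNat_of_nonneg hi.1).symm⟩
      obtain ⟨nj, rfl⟩ : ∃ nj : Nat, jj = (nj : Int) := ⟨jj.toNat, (Int.toNat_of_nonneg (by omega)).symm⟩
      rw [PySem.List.slice_toNat _ (Int.natCast_nonneg ni) (Int.natCast_nonneg nj)] at hpal ⊢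
      simp only [Int.toNat_natCast] at hpal ⊢
      exact ⟨ni, nj, by omega, by omega, rfl, hpal⟩
  · rintro ⟨ni, nj, hij, hjlen, rfl, hpal⟩
    right
    refine ⟨(ni : Int), by rw [PySem.List.mem_pyRange_one]; omega,
      (nj : Int), by rw [PySem.List.mem_pyRange_one]; omega, ?_, ?_⟩
    · rw [PySem.List.slice_toNat _ (Int.natCast_nonneg ni) (Int.natCast_nonneg nj)]
      simp only [Int.toNat_natCast]
      exact hpal
    · rw [PySem.List.slice_toNat _ (Int.natCast_nonneg ni) (Int.natCast_nonneg nj)]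
      simp only [Int.toNat_natCast]
      rfl

-- two collections with the same members: A's len(set(p)) equals B's len(found)
theorem count_eq (A B : List (List Char)) (hB : B.Nodup) (h : ∀ t, t ∈ A ↔ t ∈ B) :
    ((PySem.Set.ofList A).length : Int) = (PySem.Set.len B : Int) := by
  have hperm : (PySem.Set.ofList A).Perm B :=
    (List.perm_ext_iff_of_nodup (PySem.Set.nodup_ofList A) hB).mpr
      (fun t => by rw [PySem.Set.mem_ofList]; exact h t)
  have hlen : PySem.Set.len B = B.length := rfl
  rw [hlen, hperm.length_eq]

-- ===== VERDICT (by name: the statement is the Claim_ definition above) =====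
theorem palindromeSubCnt_spec : Claim_equal_palindromeSubCnt := by
  intro s _
  show palindromeSubCnt s = palindromeSubCnt_alt s
  simp only [palindromeSubCnt, palindromeSubCnt_alt]
  refine count_eq _ _ ?_ (fun t => (memA_iff s t).trans (memB_iff s t).symm)
  refine nodup_foldl _ (fun p c hp => nodup_foldl _ (fun p' c' hp' => ?_) _ p hp) _ _ (by simp [PySem.Set.empty])
  dsimp only
  split_ifs
  · exact PySem.Set.nodup_add _ _ hp'
  · exact hp'
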